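-- pv_equiv track=rewrite | github.com/Michael-W-Ellison/patmat | chess_pattern_ai/safety_evaluator.py | _count_pawn_shield
-- ===== SOURCE A (Python) =====
-- def _count_pawn_shield(board_part: str, king_square: int, color: str) -> int:
--     """Count pawns near king (observable feature, no assumptions about what's good)"""
--     # Convert board to simple representation
--     board = [None] * 64
--     square = 56
--
--     for rank in board_part.split('/'):
--         file = 0
--         for char in rank:
--             if char.isdigit():
--                 file += int(char)
--             else:
--                 board[square + file] = char
--                 file += 1
--         square -= 8
--
--     # Count friendly pawns in all adjacent squares
--     king_file = king_square % 8
--     king_rank = king_square // 8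
--
--     pawn_char = 'P' if color == 'white' else 'p'
--     pawn_count = 0
--
--     # Check all 8 surrounding squares for pawns
--     for dr in [-1, 0, 1]:
--         for df in [-1, 0, 1]:
--             if dr == 0 and df == 0:
--                 continue
--             check_rank = king_rank + dr
--             check_file = king_file + df
--             if 0 <= check_rank < 8 and 0 <= check_file < 8:
--                 check_square = check_rank * 8 + check_file
--                 if board[check_square] == pawn_char:
--                     pawn_count += 1
--
--     return pawn_count
-- ===== SOURCE B (Python) =====
-- def _count_pawn_shield(board_part: str, king_square: int, color: str) -> int:
--     """Count pawns near king: single pass over the FEN, no 64-square board built."""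
--     king_file = king_square % 8
--     king_rank = king_square // 8
--     pawn_char = 'P' if color == 'white' else 'p'
--     nbrs = [(king_rank + dr) * 8 + (king_file + df)
--             for dr in (-1, 0, 1) for df in (-1, 0, 1)
--             if not (dr == 0 and df == 0)
--             and 0 <= king_rank + dr < 8 and 0 <= king_file + df < 8]
--     count = 0
--     square = 56
--     file = 0
--     for char in board_part:
--         if char == '/':
--             square -= 8
--             file = 0
--         elif char.isdigit():
--             file += int(char)
--         else:
--             if square + file in nbrs and char == pawn_char:
--                 count += 1
--             file += 1
--     return count
-- ===== Notes on version B (the rewrite author's own statement) =====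
-- stated objective: alternative
-- what changed: Instead of materialising a 64-entry board array and then scanning the 3x3 neighbourhood of the king, B precomputes the list of in-bounds neighbour squares and counts matching pawns in a single pass over the FEN string, with no board ever built.
-- outside the precondition, e.g. on _count_pawn_shield('8/8/8/8/8/8/8/8/P', 48, 'white'): A returns 1, B returns 0; on _count_pawn_shield('p9', 0, 'white'): A returns 0, B returns 0
import Mathlib
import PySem

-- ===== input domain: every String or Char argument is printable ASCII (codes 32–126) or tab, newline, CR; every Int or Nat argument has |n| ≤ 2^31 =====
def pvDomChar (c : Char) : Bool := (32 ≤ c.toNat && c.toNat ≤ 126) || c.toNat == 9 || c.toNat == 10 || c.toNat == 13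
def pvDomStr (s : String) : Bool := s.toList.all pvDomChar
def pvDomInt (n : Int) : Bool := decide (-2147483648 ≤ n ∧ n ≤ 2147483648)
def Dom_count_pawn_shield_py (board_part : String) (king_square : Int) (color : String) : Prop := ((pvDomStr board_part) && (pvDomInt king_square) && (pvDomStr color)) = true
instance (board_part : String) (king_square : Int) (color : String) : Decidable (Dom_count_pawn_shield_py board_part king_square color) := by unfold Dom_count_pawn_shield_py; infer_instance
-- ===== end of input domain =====

-- B re-implements the count in one pass over the FEN against a precomputed neighbour-square list,
-- building no 64-square board and running no second 3x3 scan; the return value is unchanged on Pre_.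

-- int(char) for a single character, as both Pythons compute it (guarded by char.isdigit())
def pvDigitVal (c : Char) : Int := (PySem.Int.ofChars? [c]).getD 0

-- ===== PORT A =====
def count_pawn_shield_py (board_part : String) (king_square : Int) (color : String) : Int :=
  let board0 : List (Option Char) := List.replicate 64 none
  let ranks : List (List Char) := PySem.Chars.splitOn board_part.toList ['/']
  let st :=
    ranks.foldl
      (fun (st : List (Option Char) × Int) rank =>
        let board := st.1
        let square := st.2
        let st2 :=
          rank.foldl
            (fun (st2 : List (Option Char) × Int) char =>
              let board := st2.1
              let file := st2.2
              if PySem.Chars.isdigit char then (board, file + pvDigitVal char)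
              else (PySem.List.pySetD board (square + file) (some char), file + 1))
            (board, 0)
        (st2.1, square - 8))
      (board0, 56)
  let board := st.1
  let king_file := PySem.Int.mod king_square 8
  let king_rank := PySem.Int.floordiv king_square 8
  let pawn_char : Char := if color = "white" then 'P' else 'p'
  let pawn_count :=
    ([-1, 0, 1] : List Int).foldl
      (fun cnt dr =>
        ([-1, 0, 1] : List Int).foldl
          (fun cnt df =>
            if dr = 0 ∧ df = 0 then cnt
            else
              let check_rank := king_rank + dr
              let check_file := king_file + df
              if (0 ≤ check_rank ∧ check_rank < 8) ∧ (0 ≤ check_file ∧ check_file < 8) then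
                let check_square := check_rank * 8 + check_file
                if PySem.List.pyGetD board check_square none = some pawn_char then cnt + 1 else cnt
              else cnt)
          cnt)
      (0 : Int)
  pawn_count

-- ===== PORT B =====
def count_pawn_shield_py_alt (board_part : String) (king_square : Int) (color : String) : Int :=
  let king_file := PySem.Int.mod king_square 8
  let king_rank := PySem.Int.floordiv king_square 8
  let pawn_char : Char := if color = "white" then 'P' else 'p'
  let nbrs : List Int :=
    ([-1, 0, 1] : List Int).flatMap
      (fun dr =>
        ([-1, 0, 1] : List Int).flatMap
          (fun df =>
            if ¬(dr = 0 ∧ df = 0) ∧ (0 ≤ king_rank + dr ∧ king_rank + dr < 8) ∧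
                (0 ≤ king_file + df ∧ king_file + df < 8) then
              [(king_rank + dr) * 8 + (king_file + df)]
            else []))
  let st :=
    board_part.toList.foldl
      (fun (st : Int × Int × Int) char =>
        let count := st.1
        let square := st.2.1
        let file := st.2.2
        if char = '/' then (count, square - 8, 0)
        else if PySem.Chars.isdigit char then (count, square, file + pvDigitVal char)
        else ((if (square + file) ∈ nbrs ∧ char = pawn_char then count + 1 else count),
              square, file + 1))
      (0, 56, 0)
  st.1


-- ===== PRECONDITION & SPEC =====
-- expanded width of one FEN rank (digits advance the file by their value, any other char by one)
def pvWidth : List Char → Int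
  | [] => 0
  | c :: cs => (if PySem.Chars.isdigit c then (c.toNat : Int) - 48 else 1) + pvWidth cs
-- Pre_: well-formed placement fields — at most 8 ranks, each of expanded width at most 8: exactly
-- the boards that fit the 8x8 grid.  Wider or deeper boards overflow A's 64-square array: there A
-- either raises IndexError or (once its running square index has gone negative) silently wraps
-- around to unrelated squares, a value as accidental as any other, so they are excluded.
def Pre_count_pawn_shield_py (board_part : String) (king_square : Int) (color : String) : Prop :=
  (PySem.Chars.splitOn board_part.toList ['/']).length ≤ 8 ∧
  ∀ r ∈ PySem.Chars.splitOn board_part.toList ['/'], pvWidth r ≤ 8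

instance (board_part : String) (king_square : Int) (color : String) :
    Decidable (Pre_count_pawn_shield_py board_part king_square color) := by
  unfold Pre_count_pawn_shield_py; infer_instance

def pvWitness_count_pawn_shield_py : String × Int × String := ("8/8/8/8/8/8/PPP5/8", 9, "white")

def Spec_count_pawn_shield_py (board_part : String) (king_square : Int) (color : String) (out : Int) : Prop := out = count_pawn_shield_py_alt board_part king_square color
instance (board_part : String) (king_square : Int) (color : String) (out : Int) : Decidable (Spec_count_pawn_shield_py board_part king_square color out) := by unfold Spec_count_pawn_shield_py; infer_instance

-- ===== CLAIM (what is proved, stated in full; the proofs are below) =====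
def Claim_equal_count_pawn_shield_py : Prop := ∀ (board_part : String) (king_square : Int) (color : String), Dom_count_pawn_shield_py board_part king_square color → Pre_count_pawn_shield_py board_part king_square color → Spec_count_pawn_shield_py board_part king_square color (count_pawn_shield_py board_part king_square color)

-- ===== LEMMAS AND PROOFS =====

theorem pvDigitVal_digit (c : Char) (h : PySem.Chars.isdigit c = true) :
    pvDigitVal c = (c.toNat : Int) - 48 := by
  have h1 : 48 ≤ c.toNat ∧ c.toNat ≤ 57 := by
    simp [PySem.Chars.isdigit, Char.le_def] at h
    exact ⟨h.1, h.2⟩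
  have hc : Char.ofNat c.toNat = c := Char.ofNat_toNat c
  obtain ⟨hl, hr⟩ := h1
  unfold pvDigitVal
  interval_cases hv : c.toNat <;> rw [← hc] <;> decide
theorem pvDigitVal_nonneg (c : Char) (h : PySem.Chars.isdigit c = true) : 0 ≤ pvDigitVal c := by
  have h1 : 48 ≤ c.toNat := by
    simp [PySem.Chars.isdigit, Char.le_def] at h
    exact h.1
  rw [pvDigitVal_digit c h]; omega
def pvConsume : List Char → List Char → List (List Char)
  | [], cur => [cur.reverse]
  | c :: rest, cur => if c = '/' then cur.reverse :: pvConsume rest [] else pvConsume rest (c :: cur)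

theorem pvSplitOn_go_eq (fuel : Nat) : ∀ (l cur : List Char) (acc : List (List Char)),
    l.length ≤ fuel →
    PySem.Chars.splitOn.go ['/'] fuel l cur acc = acc.reverse ++ pvConsume l cur := by
  induction fuel with
  | zero =>
    intro l cur acc h
    have : l = [] := List.eq_nil_of_length_eq_zero (Nat.le_zero.mp h)
    subst this
    simp [PySem.Chars.splitOn.go, pvConsume]
  | succ n ih =>
    intro l cur acc h
    cases l with
    | nil => simp [PySem.Chars.splitOn.go, pvConsume]
    | cons c rest =>
      by_cases hc : c = '/'
      · subst hc
        rw [PySem.Chars.splitOn.go]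
        simp only [List.isPrefixOf, Bool.and_true, beq_self_eq_true, if_pos, List.length_cons,
          List.length_nil, List.drop_succ_cons, List.drop_zero]
        rw [ih rest [] (cur.reverse :: acc) (by simpa using Nat.le_of_succ_le_succ h)]
        simp [pvConsume]
      · rw [PySem.Chars.splitOn.go]
        have : (['/'].isPrefixOf (c :: rest)) = false := by
          simp [List.isPrefixOf]; exact fun hne => (hc hne.symm).elim
        rw [this]
        simp only [Bool.false_eq_true, if_false]
        rw [ih rest (c :: cur) acc (by simpa using Nat.le_of_succ_le_succ h)]
        simp [pvConsume, hc]

theorem pvSplitOn_eq (cs : List Char) :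
    PySem.Chars.splitOn cs ['/'] = pvConsume cs [] := by
  rw [PySem.Chars.splitOn, pvSplitOn_go_eq (cs.length + 1) cs [] [] (by omega)]
  simp


def pvRankP : List Char → Int → Int → List (Int × Char)
  | [], _, _ => []
  | c :: cs, sq, f =>
    if PySem.Chars.isdigit c then pvRankP cs sq (f + pvDigitVal c)
    else (sq + f, c) :: pvRankP cs sq (f + 1)
def pvPlsR : List (List Char) → Int → List (Int × Char)
  | [], _ => []
  | r :: rs, sq => pvRankP r sq 0 ++ pvPlsR rs (sq - 8)
def pvPls : List Char → Int → Int → List (Int × Char)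
  | [], _, _ => []
  | c :: cs, sq, f =>
    if c = '/' then pvPls cs (sq - 8) 0
    else if PySem.Chars.isdigit c then pvPls cs sq (f + pvDigitVal c)
    else (sq + f, c) :: pvPls cs sq (f + 1)
def pvEndf : List Char → Int → Int
  | [], f => f
  | c :: cs, f => pvEndf cs (if PySem.Chars.isdigit c then f + pvDigitVal c else f + 1)
theorem pvEndf_append (xs ys : List Char) (f : Int) :
    pvEndf (xs ++ ys) f = pvEndf ys (pvEndf xs f) := by
  induction xs generalizing f with
  | nil => simp [pvEndf]
  | cons c cs ih => simp only [List.cons_append, pvEndf]; exact ih _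

theorem pvRankP_append (xs ys : List Char) (sq : Int) : ∀ f : Int,
    pvRankP (xs ++ ys) sq f = pvRankP xs sq f ++ pvRankP ys sq (pvEndf xs f) := by
  induction xs with
  | nil => intro f; simp [pvRankP, pvEndf]
  | cons c cs ih =>
    intro f
    by_cases hd : PySem.Chars.isdigit c = true
    · simp only [List.cons_append, pvRankP, pvEndf, hd, if_pos, if_true]; exact ih _
    · simp only [List.cons_append, pvRankP, pvEndf, hd, if_false, Bool.false_eq_true, List.cons_append]
      rw [ih]

theorem pvPls_eq_plsR_aux : ∀ (cs cur : List Char) (sq : Int),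
    pvRankP cur.reverse sq 0 ++ pvPls cs sq (pvEndf cur.reverse 0) = pvPlsR (pvConsume cs cur) sq := by
  intro cs
  induction cs with
  | nil => intro cur sq; simp [pvPls, pvConsume, pvPlsR]
  | cons c rest ih =>
    intro cur sq
    by_cases hc : c = '/'
    · subst hc
      simp only [pvConsume, if_pos, pvPls, if_true, pvPlsR]
      rw [← ih [] (sq - 8)]
      simp [pvRankP, pvEndf]
    · by_cases hd : PySem.Chars.isdigit c = true
      · simp only [pvConsume, hc, if_false, pvPls, hd, if_true]
        rw [← ih (c :: cur) sq]
        simp only [List.reverse_cons]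
        rw [pvRankP_append, pvEndf_append]
        simp [pvRankP, pvEndf, hd]
      · simp only [pvConsume, hc, if_false, pvPls, hd, Bool.false_eq_true]
        rw [← ih (c :: cur) sq]
        simp only [List.reverse_cons]
        rw [pvRankP_append, pvEndf_append]
        simp [pvRankP, pvEndf, hd, hc]

theorem pvPls_eq_plsR (cs : List Char) (sq : Int) :
    pvPls cs sq 0 = pvPlsR (pvConsume cs []) sq := by
  have := pvPls_eq_plsR_aux cs [] sq
  simpa [pvRankP, pvEndf] using this

theorem pvWidth_nonneg (r : List Char) : 0 ≤ pvWidth r := by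
  induction r with
  | nil => simp [pvWidth]
  | cons c cs ih =>
    by_cases hd : PySem.Chars.isdigit c = true
    · have : 48 ≤ c.toNat := by
        simp [PySem.Chars.isdigit, Char.le_def] at hd; exact hd.1
      simp only [pvWidth, hd, if_true]; omega
    · simp only [pvWidth, hd, Bool.false_eq_true, if_false]; omega

theorem pvRankP_lb (r : List Char) : ∀ (sq f : Int), ∀ p ∈ pvRankP r sq f, sq + f ≤ p.1 := by
  induction r with
  | nil => intro sq f p hp; simp [pvRankP] at hp
  | cons c cs ih =>
    intro sq f p hp
    by_cases hd : PySem.Chars.isdigit c = true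
    · simp only [pvRankP, hd, if_true] at hp
      have := ih sq (f + pvDigitVal c) p hp
      have := pvDigitVal_nonneg c hd
      omega
    · simp only [pvRankP, hd, Bool.false_eq_true, if_false, List.mem_cons] at hp
      rcases hp with h | h
      · subst h; omega
      · have := ih sq (f + 1) p h; omega

theorem pvRankP_ub (r : List Char) : ∀ (sq f : Int), ∀ p ∈ pvRankP r sq f, p.1 < sq + f + pvWidth r := by
  induction r with
  | nil => intro sq f p hp; simp [pvRankP] at hp
  | cons c cs ih =>
    intro sq f p hp
    by_cases hd : PySem.Chars.isdigit c = true
    · simp only [pvRankP, hd, if_true] at hp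
      have := ih sq (f + pvDigitVal c) p hp
      rw [pvDigitVal_digit c hd] at this
      simp only [pvWidth, hd, if_true]
      omega
    · simp only [pvRankP, hd, Bool.false_eq_true, if_false, List.mem_cons] at hp
      have hw := pvWidth_nonneg cs
      simp only [pvWidth, hd, Bool.false_eq_true, if_false]
      rcases hp with h | h
      · subst h; simp; omega
      · have := ih sq (f + 1) p h; omega

theorem pvPlsR_ub (rs : List (List Char)) : ∀ (sq : Int), (∀ r ∈ rs, pvWidth r ≤ 8) →
    ∀ p ∈ pvPlsR rs sq, p.1 < sq + 8 := by
  induction rs with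
  | nil => intro sq _ p hp; simp [pvPlsR] at hp
  | cons r rs ih =>
    intro sq hw p hp
    simp only [pvPlsR, List.mem_append] at hp
    rcases hp with h | h
    · have := pvRankP_ub r sq 0 p h
      have := hw r (by simp)
      omega
    · have := ih (sq - 8) (fun r hr => hw r (by simp [hr])) p h
      omega

theorem pvRankP_pairwise (r : List Char) : ∀ (sq f : Int),
    ((pvRankP r sq f).map (·.1)).Pairwise (· < ·) := by
  induction r with
  | nil => intro sq f; simp [pvRankP]
  | cons c cs ih =>
    intro sq f
    by_cases hd : PySem.Chars.isdigit c = true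
    · simp only [pvRankP, hd, if_true]; exact ih sq _
    · simp only [pvRankP, hd, Bool.false_eq_true, if_false, List.map_cons]
      refine List.Pairwise.cons ?_ (ih sq (f + 1))
      intro x hx
      simp only [List.mem_map] at hx
      obtain ⟨p, hp, rfl⟩ := hx
      have := pvRankP_lb cs sq (f + 1) p hp
      omega

theorem pvPlsR_nodup (rs : List (List Char)) : ∀ (sq : Int), (∀ r ∈ rs, pvWidth r ≤ 8) →
    ((pvPlsR rs sq).map (·.1)).Nodup := by
  induction rs with
  | nil => intro sq _; simp [pvPlsR]
  | cons r rs ih =>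
    intro sq hw
    simp only [pvPlsR, List.map_append]
    rw [List.nodup_append]
    refine ⟨(pvRankP_pairwise r sq 0).nodup, ih (sq - 8) (fun r' hr => hw r' (by simp [hr])), ?_⟩
    intro x hx y hy
    simp only [List.mem_map] at hx hy
    obtain ⟨p, hp, rfl⟩ := hx
    obtain ⟨q, hq, rfl⟩ := hy
    have h1 := pvRankP_lb r sq 0 p hp
    have h2 := pvPlsR_ub rs (sq - 8) (fun r' hr => hw r' (by simp [hr])) q hq
    omega

theorem pvPyGetD_replicate (s : Int) : PySem.List.pyGetD (List.replicate 64 (none : Option Char)) s none = none := by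
  simp only [PySem.List.pyGetD, PySem.List.pyIdx?, PySem.List.pyGet?, List.length_replicate]
  split_ifs with h1 h2 h3
  · rw [Option.bind_some, List.getElem?_replicate]
    simp only [if_pos (by omega : s.toNat < 64)]
    rfl
  · rfl
  · rw [Option.bind_some, List.getElem?_replicate]
    simp only [if_pos (by omega : 64 - (-s).toNat < 64)]
    rfl
  · rfl

theorem pvGetD_setD (xs : List (Option Char)) (w : Int) (v : Option Char) (s : Int)
    (hw0 : 0 ≤ w) (hw1 : w < (xs.length : Int)) (hs : 0 ≤ s) :
    PySem.List.pyGetD (PySem.List.pySetD xs w v) s none = if s = w then v else PySem.List.pyGetD xs s none := by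
  have hw' : w = ((w.toNat : Nat) : Int) := (Int.toNat_of_nonneg hw0).symm
  have hs' : s = ((s.toNat : Nat) : Int) := (Int.toNat_of_nonneg hs).symm
  rw [hw', hs', PySem.List.pyGetD_pySetD_natCast xs w.toNat s.toNat v none (by omega)]
  by_cases h : s = w
  · rw [if_pos (by omega), if_pos (by omega)]
  · rw [if_neg (by omega), if_neg (by omega)]

theorem pvProcessRank_spec (r : List Char) : ∀ (board : List (Option Char)) (sq f : Int),
    board.length = 64 → 0 ≤ sq + f → sq + f + pvWidth r ≤ 64 →
    (r.foldl
      (fun (st2 : List (Option Char) × Int) char =>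
        if PySem.Chars.isdigit char then (st2.1, st2.2 + pvDigitVal char)
        else (PySem.List.pySetD st2.1 (sq + st2.2) (some char), st2.2 + 1))
      (board, f)).1.length = 64 ∧
    ∀ s : Int, 0 ≤ s →
      PySem.List.pyGetD (r.foldl
        (fun (st2 : List (Option Char) × Int) char =>
          if PySem.Chars.isdigit char then (st2.1, st2.2 + pvDigitVal char)
          else (PySem.List.pySetD st2.1 (sq + st2.2) (some char), st2.2 + 1))
        (board, f)).1 s none =
      (match (pvRankP r sq f).find? (fun p => p.1 == s) with
       | some p => some p.2
       | none => PySem.List.pyGetD board s none) := by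
  induction r with
  | nil =>
    intro board sq f hlen _ _
    exact ⟨hlen, fun s _ => by simp [pvRankP]⟩
  | cons c cs ih =>
    intro board sq f hlen hlb hub
    simp only [pvWidth] at hub
    by_cases hd : PySem.Chars.isdigit c = true
    · have hdv := pvDigitVal_digit c hd
      have hw48 : 48 ≤ c.toNat := by
        simp [PySem.Chars.isdigit, Char.le_def] at hd; exact hd.1
      simp only [List.foldl_cons, hd, if_true]
      have := ih board sq (f + pvDigitVal c) hlen (by omega) (by rw [hdv]; simp [hd] at hub ⊢; omega)
      refine ⟨this.1, fun s hs => ?_⟩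
      rw [this.2 s hs]
      simp only [pvRankP, hd, if_true]
    · have hb1 : (PySem.List.pySetD board (sq + f) (some c)).length = 64 := by
        rw [PySem.List.length_pySetD]; exact hlen
      have hwid := pvWidth_nonneg cs
      simp only [hd, Bool.false_eq_true, if_false] at hub
      simp only [List.foldl_cons, hd, Bool.false_eq_true, if_false]
      have := ih (PySem.List.pySetD board (sq + f) (some c)) sq (f + 1) hb1 (by omega) (by omega)
      refine ⟨this.1, fun s hs => ?_⟩
      rw [this.2 s hs]
      simp only [pvRankP, hd, Bool.false_eq_true, if_false, List.find?_cons]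
      cases hfind : (pvRankP cs sq (f + 1)).find? (fun p => p.1 == s) with
      | some p =>
        have hmem := List.mem_of_find?_eq_some hfind
        have hps : p.1 = s := by simpa using List.find?_some hfind
        have := pvRankP_lb cs sq (f + 1) p hmem
        have hne : ((sq + f : Int) == s) = false := by simp; omega
        rw [hne]
      | none =>
        rw [pvGetD_setD board (sq + f) (some c) s (by omega) (by rw [hlen]; omega) hs]
        by_cases hse : s = sq + f
        · have : ((sq + f : Int) == s) = true := by simp [hse]
          rw [this, if_pos hse]
        · have : ((sq + f : Int) == s) = false := by simp; omega
          rw [this, if_neg hse]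

theorem pvProcessRanks_spec (rs : List (List Char)) : ∀ (board : List (Option Char)) (sq : Int),
    board.length = 64 → 8 * (rs.length : Int) ≤ sq + 8 → sq + 8 ≤ 64 →
    (∀ r ∈ rs, pvWidth r ≤ 8) →
    (rs.foldl
      (fun (st : List (Option Char) × Int) rank =>
        ((rank.foldl
          (fun (st2 : List (Option Char) × Int) char =>
            if PySem.Chars.isdigit char then (st2.1, st2.2 + pvDigitVal char)
            else (PySem.List.pySetD st2.1 (st.2 + st2.2) (some char), st2.2 + 1))
          (st.1, 0)).1, st.2 - 8))
      (board, sq)).1.length = 64 ∧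
    ∀ s : Int, 0 ≤ s →
      PySem.List.pyGetD (rs.foldl
        (fun (st : List (Option Char) × Int) rank =>
          ((rank.foldl
            (fun (st2 : List (Option Char) × Int) char =>
              if PySem.Chars.isdigit char then (st2.1, st2.2 + pvDigitVal char)
              else (PySem.List.pySetD st2.1 (st.2 + st2.2) (some char), st2.2 + 1))
            (st.1, 0)).1, st.2 - 8))
        (board, sq)).1 s none =
      (match (pvPlsR rs sq).find? (fun p => p.1 == s) with
       | some p => some p.2
       | none => PySem.List.pyGetD board s none) := by
  induction rs with
  | nil =>
    intro board sq hlen _ _ _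
    exact ⟨hlen, fun s _ => by simp [pvPlsR]⟩
  | cons r rs ih =>
    intro board sq hlen h8 h64 hw
    have hlenr : 8 * ((r :: rs).length : Int) ≤ sq + 8 := h8
    simp only [List.length_cons] at h8
    push_cast at h8
    have hwr : pvWidth r ≤ 8 := hw r (by simp)
    have hinner := pvProcessRank_spec r board sq 0 hlen (by omega) (by omega)
    simp only [List.foldl_cons]
    have houter := ih (r.foldl
          (fun (st2 : List (Option Char) × Int) char =>
            if PySem.Chars.isdigit char then (st2.1, st2.2 + pvDigitVal char)
            else (PySem.List.pySetD st2.1 (sq + st2.2) (some char), st2.2 + 1))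
          (board, 0)).1 (sq - 8) hinner.1 (by omega) (by omega)
          (fun r' hr => hw r' (by simp [hr]))
    refine ⟨houter.1, fun s hs => ?_⟩
    rw [houter.2 s hs]
    simp only [pvPlsR, List.find?_append]
    cases hrest : (pvPlsR rs (sq - 8)).find? (fun p => p.1 == s) with
    | some p =>
      have hmem := List.mem_of_find?_eq_some hrest
      have hps : p.1 = s := by simpa using List.find?_some hrest
      have hub := pvPlsR_ub rs (sq - 8) (fun r' hr => hw r' (by simp [hr])) p hmem
      have hhead : (pvRankP r sq 0).find? (fun p => p.1 == s) = none := by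
        rw [List.find?_eq_none]
        intro q hq
        have := pvRankP_lb r sq 0 q hq
        simp; omega
      rw [hhead]
      simp
    | none =>
      rw [hinner.2 s hs]
      cases hhead : (pvRankP r sq 0).find? (fun p => p.1 == s) with
      | some q => simp
      | none => simp

theorem pvBfold_eq (nbrs : List Int) (pawn : Char) : ∀ (cs : List Char) (cnt sq f : Int),
    (cs.foldl
      (fun (st : Int × Int × Int) char =>
        if char = '/' then (st.1, st.2.1 - 8, 0)
        else if PySem.Chars.isdigit char then (st.1, st.2.1, st.2.2 + pvDigitVal char)
        else ((if (st.2.1 + st.2.2) ∈ nbrs ∧ char = pawn then st.1 + 1 else st.1),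
              st.2.1, st.2.2 + 1))
      (cnt, sq, f)).1
    = cnt + ((pvPls cs sq f).countP (fun p => decide (p.1 ∈ nbrs) && (p.2 == pawn)) : Int) := by
  intro cs
  induction cs with
  | nil => intro cnt sq f; simp [pvPls]
  | cons c rest ih =>
    intro cnt sq f
    by_cases hc : c = '/'
    · subst hc
      simp only [List.foldl_cons, pvPls]
      exact ih cnt (sq - 8) 0
    · by_cases hd : PySem.Chars.isdigit c = true
      · simp only [List.foldl_cons, if_neg hc, hd, if_true, pvPls]
        exact ih cnt sq (f + pvDigitVal c)
      · simp only [List.foldl_cons, if_neg hc, hd, Bool.false_eq_true, if_false, pvPls]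
        rw [ih _ sq (f + 1), List.countP_cons]
        by_cases hin : (sq + f) ∈ nbrs ∧ c = pawn
        · rw [if_pos hin]
          have : (decide ((sq + f : Int) ∈ nbrs) && (c == pawn)) = true := by
            simp [hin.1, hin.2]
          rw [this]
          simp
          omega
        · rw [if_neg hin]
          have : (decide ((sq + f : Int) ∈ nbrs) && (c == pawn)) = false := by
            rw [Classical.not_and_iff_not_or_not] at hin
            rcases hin with h | h <;> simp [h]
          rw [this]
          push_cast
          ring

theorem pvInnerFold (C : Int → Int → Prop) [∀ a b, Decidable (C a b)] (sqf : Int → Int → Int)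
    (R : Int → Prop) [DecidablePred R] (dr : Int) :
    ∀ (L2 : List Int) (a : Int),
    (L2.foldl (fun cnt df =>
      if dr = 0 ∧ df = 0 then cnt
      else if C dr df then (if R (sqf dr df) then cnt + 1 else cnt) else cnt) a)
    = a + ((L2.flatMap (fun df => if ¬(dr = 0 ∧ df = 0) ∧ C dr df then [sqf dr df] else [])).countP
        (fun s => decide (R s)) : Int) := by
  intro L2
  induction L2 with
  | nil => intro a; simp
  | cons df L ih =>
    intro a
    simp only [List.foldl_cons, List.flatMap_cons, List.countP_append]
    by_cases h0 : dr = 0 ∧ df = 0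
    · rw [if_pos h0, if_neg (by simp [h0]), ih]
      simp
    · rw [if_neg h0]
      by_cases hC : C dr df
      · rw [if_pos hC, if_pos (show ¬(dr = 0 ∧ df = 0) ∧ C dr df from ⟨h0, hC⟩)]
        by_cases hR : R (sqf dr df)
        · rw [if_pos hR, ih]
          simp [hR]
          omega
        · rw [if_neg hR, ih]
          simp [hR]
      · rw [if_neg hC, if_neg (by tauto), ih]
        simp

theorem pvOuterFold (C : Int → Int → Prop) [∀ a b, Decidable (C a b)] (sqf : Int → Int → Int)
    (R : Int → Prop) [DecidablePred R] :
    ∀ (L1 L2 : List Int) (a : Int),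
    (L1.foldl (fun cnt dr => L2.foldl (fun cnt df =>
      if dr = 0 ∧ df = 0 then cnt
      else if C dr df then (if R (sqf dr df) then cnt + 1 else cnt) else cnt) cnt) a)
    = a + ((L1.flatMap (fun dr => L2.flatMap (fun df =>
        if ¬(dr = 0 ∧ df = 0) ∧ C dr df then [sqf dr df] else []))).countP
        (fun s => decide (R s)) : Int) := by
  intro L1 L2
  induction L1 with
  | nil => intro a; simp
  | cons dr L ih =>
    intro a
    simp only [List.foldl_cons, List.flatMap_cons, List.countP_append]
    rw [pvInnerFold C sqf R dr L2 a, ih]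
    push_cast
    ring

theorem pvFlat_mem (L1 L2 : List Int) (P : Int → Int → Prop) [∀ a b, Decidable (P a b)]
    (g : Int → Int → Int) (x : Int) :
    (x ∈ L1.flatMap (fun a => L2.flatMap (fun b => if P a b then [g a b] else []))) ↔
    ∃ a ∈ L1, ∃ b ∈ L2, P a b ∧ x = g a b := by
  simp only [List.mem_flatMap]
  constructor
  · rintro ⟨a, ha, b, hb, hm⟩
    by_cases h : P a b
    · simp [h] at hm; exact ⟨a, ha, b, hb, h, hm⟩
    · simp [h] at hm
  · rintro ⟨a, ha, b, hb, h, rfl⟩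
    exact ⟨a, ha, b, hb, by simp [h]⟩

theorem pvFlatInner_nodup (L2 : List Int) (Q : Int → Prop) [DecidablePred Q] (g : Int → Int)
    (h2 : L2.Nodup)
    (hg : ∀ b b', b ∈ L2 → b' ∈ L2 → Q b → Q b' → g b = g b' → b = b') :
    (L2.flatMap (fun b => if Q b then [g b] else [])).Nodup := by
  induction L2 with
  | nil => simp
  | cons b L ih =>
    simp only [List.flatMap_cons]
    have hbl : b ∉ L := (List.nodup_cons.mp h2).1
    have hL : L.Nodup := (List.nodup_cons.mp h2).2
    have ihL := ih hL (fun x y hx hy => hg x y (by simp [hx]) (by simp [hy]))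
    by_cases h : Q b
    · rw [if_pos h]
      simp only [List.singleton_append, List.nodup_cons]
      refine ⟨?_, ihL⟩
      intro hmem
      simp only [List.mem_flatMap] at hmem
      obtain ⟨b', hb', hm⟩ := hmem
      by_cases h' : Q b'
      · simp [h'] at hm
        have := hg b b' (by simp) (by simp [hb']) h h' hm
        exact hbl (this ▸ hb')
      · simp [h'] at hm
    · rw [if_neg h]
      simpa using ihL

theorem pvFlat_nodup (L1 L2 : List Int) (P : Int → Int → Prop) [∀ a b, Decidable (P a b)]
    (g : Int → Int → Int) (h1 : L1.Nodup) (h2 : L2.Nodup)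
    (hg : ∀ a b a' b', a ∈ L1 → b ∈ L2 → a' ∈ L1 → b' ∈ L2 → P a b → P a' b' →
      g a b = g a' b' → a = a' ∧ b = b') :
    (L1.flatMap (fun a => L2.flatMap (fun b => if P a b then [g a b] else []))).Nodup := by
  induction L1 with
  | nil => simp
  | cons a L ih =>
    simp only [List.flatMap_cons]
    have hal : a ∉ L := (List.nodup_cons.mp h1).1
    have hL : L.Nodup := (List.nodup_cons.mp h1).2
    rw [List.nodup_append]
    refine ⟨?_, ?_, ?_⟩
    · exact pvFlatInner_nodup L2 (P a) (g a) h2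
        (fun b b' hb hb' hq hq' he => (hg a b a b' (by simp) hb (by simp) hb' hq hq' he).2)
    · exact ih hL (fun x y x' y' hx hy hx' hy' => hg x y x' y' (by simp [hx]) hy (by simp [hx']) hy')
    · intro x hx y hy
      simp only [List.mem_flatMap] at hx
      obtain ⟨b, hb, hmx⟩ := hx
      by_cases hq : P a b
      · simp only [hq, if_true, List.mem_singleton] at hmx
        subst hmx
        obtain ⟨a', ha', b', hb', hq', he⟩ := (pvFlat_mem L L2 P g y).mp hy
        intro heq
        have he2 : g a b = g a' b' := heq.trans he
        have := hg a b a' b' (by simp) hb (by simp [ha']) hb' hq hq' he2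
        exact absurd (this.1 ▸ ha') hal
      · simp [hq] at hmx

theorem pvCountP_mem_cons (PL : List (Int × Char)) (pawn : Char) (s : Int) (ns : List Int)
    (hs : s ∉ ns) :
    PL.countP (fun p => decide (p.1 ∈ s :: ns) && (p.2 == pawn)) =
    PL.countP (fun p => (p.1 == s) && (p.2 == pawn)) +
    PL.countP (fun p => decide (p.1 ∈ ns) && (p.2 == pawn)) := by
  induction PL with
  | nil => simp
  | cons p PL ih =>
    simp only [List.countP_cons, ih]
    by_cases h1 : p.1 = s
    · by_cases h2 : p.2 = pawn <;> simp [h1, h2, hs] <;> omega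
    · by_cases hm : p.1 ∈ ns
      · by_cases h2 : p.2 = pawn <;> simp [h1, h2, hm] <;> omega
      · by_cases h2 : p.2 = pawn <;> simp [h1, h2, hm]

theorem pvCountP_unique (PL : List (Int × Char)) (pawn : Char) (s : Int)
    (hnd : (PL.map (·.1)).Nodup) :
    (PL.countP (fun p => (p.1 == s) && (p.2 == pawn)) : Int) =
    (match PL.find? (fun p => p.1 == s) with
     | some p => if p.2 = pawn then 1 else 0
     | none => 0) := by
  induction PL with
  | nil => simp
  | cons p PL ih =>
    simp only [List.map_cons, List.nodup_cons] at hnd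
    simp only [List.countP_cons, List.find?_cons]
    by_cases h1 : p.1 = s
    · have hone : ((p.1 == s) : Bool) = true := by simp [h1]
      rw [hone]
      have hrest : PL.countP (fun q => (q.1 == s) && (q.2 == pawn)) = 0 := by
        rw [List.countP_eq_zero]
        intro q hq
        have : q.1 ≠ p.1 := fun he => hnd.1 (he ▸ List.mem_map_of_mem hq)
        simp [h1 ▸ this]
      rw [hrest]
      by_cases h2 : p.2 = pawn <;> simp [h2]
    · have hone : ((p.1 == s) : Bool) = false := by simp [h1]
      rw [hone]
      simp only [Bool.false_and, if_false, Nat.add_zero, Bool.false_eq_true]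
      exact ih hnd.2

theorem pvCount_bridge (pawn : Char) (PL : List (Int × Char))
    (hnd : (PL.map (·.1)).Nodup) (read : Int → Option Char) :
    ∀ ns : List Int, ns.Nodup →
    (∀ s ∈ ns, read s = ((PL.find? (fun p => p.1 == s)).map (·.2))) →
    (ns.countP (fun s => decide (read s = some pawn)) : Int) =
    (PL.countP (fun p => decide (p.1 ∈ ns) && (p.2 == pawn)) : Int) := by
  intro ns
  induction ns with
  | nil => simp
  | cons s ns ih =>
    intro hnod hread
    simp only [List.nodup_cons] at hnod
    rw [List.countP_cons]
    have := pvCountP_mem_cons PL pawn s ns hnod.1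
    rw [this]
    push_cast
    rw [← ih hnod.2 (fun t ht => hread t (by simp [ht]))]
    rw [pvCountP_unique PL pawn s hnd]
    have hr := hread s (by simp)
    cases hfind : PL.find? (fun p => p.1 == s) with
    | some p =>
      rw [hfind] at hr
      simp only [Option.map_some] at hr
      by_cases h2 : p.2 = pawn
      · have : (decide (read s = some pawn)) = true := by simp [hr, h2]
        rw [this]
        simp [h2]
        omega
      · have : (decide (read s = some pawn)) = false := by simp [hr, h2]
        rw [this]
        simp [h2]
    | none =>
      rw [hfind] at hr
      simp only [Option.map_none] at hr
      have : (decide (read s = some pawn)) = false := by simp [hr]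
      rw [this]
      simp

theorem pvMain (bp : String) (ks : Int) (color : String)
    (hlen : (PySem.Chars.splitOn bp.toList ['/']).length ≤ 8)
    (hw : ∀ r ∈ PySem.Chars.splitOn bp.toList ['/'], pvWidth r ≤ 8) :
    count_pawn_shield_py bp ks color = count_pawn_shield_py_alt bp ks color := by
  simp only [count_pawn_shield_py, count_pawn_shield_py_alt]
  set kr := PySem.Int.floordiv ks 8 with hkr
  set kf := PySem.Int.mod ks 8 with hkf
  set pawn := (if color = "white" then 'P' else 'p') with hpawn
  set ranks := PySem.Chars.splitOn bp.toList ['/'] with hranks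
  -- the final board of port A
  set board := (ranks.foldl
      (fun (st : List (Option Char) × Int) rank =>
        ((rank.foldl
          (fun (st2 : List (Option Char) × Int) char =>
            if PySem.Chars.isdigit char then (st2.1, st2.2 + pvDigitVal char)
            else (PySem.List.pySetD st2.1 (st.2 + st2.2) (some char), st2.2 + 1))
          (st.1, 0)).1, st.2 - 8))
      (List.replicate 64 (none : Option Char), 56)).1 with hboard
  -- the neighbour list of port B
  set nbrs := (([-1, 0, 1] : List Int).flatMap
      (fun dr =>
        ([-1, 0, 1] : List Int).flatMap
          (fun df =>
            if ¬(dr = 0 ∧ df = 0) ∧ (0 ≤ kr + dr ∧ kr + dr < 8) ∧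
                (0 ≤ kf + df ∧ kf + df < 8) then
              [(kr + dr) * 8 + (kf + df)]
            else []))) with hnbrs
  rw [pvOuterFold
      (fun dr df => (0 ≤ kr + dr ∧ kr + dr < 8) ∧ (0 ≤ kf + df ∧ kf + df < 8))
      (fun dr df => (kr + dr) * 8 + (kf + df))
      (fun s => PySem.List.pyGetD board s none = some pawn)
      ([-1, 0, 1] : List Int) ([-1, 0, 1] : List Int) 0]
  rw [pvBfold_eq nbrs pawn bp.toList 0 56 0]
  have hspec := pvProcessRanks_spec ranks (List.replicate 64 none) 56 (by simp)
      (by push_cast; omega) (by omega) hw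
  have hnbrs_bound : ∀ s ∈ nbrs, 0 ≤ s ∧ s < 64 := by
    intro s hs
    rw [hnbrs, pvFlat_mem] at hs
    obtain ⟨dr, hdr, df, hdf, hP, rfl⟩ := hs
    obtain ⟨-, ⟨h1, h2⟩, ⟨h3, h4⟩⟩ := hP
    constructor <;> nlinarith
  have hnbrs_nodup : nbrs.Nodup := by
    rw [hnbrs]
    apply pvFlat_nodup _ _ _ _ (by decide) (by decide)
    intro a b a' b' ha hb ha' hb' hp hp' he
    obtain ⟨-, ⟨h1, h2⟩, ⟨h3, h4⟩⟩ := hp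
    obtain ⟨-, ⟨h1', h2'⟩, ⟨h3', h4'⟩⟩ := hp'
    constructor <;> omega
  have hPLnodup := pvPlsR_nodup ranks 56 hw
  have hread : ∀ s ∈ nbrs, PySem.List.pyGetD board s none =
      ((pvPlsR ranks 56).find? (fun p => p.1 == s)).map (·.2) := by
    intro s hs
    rw [hboard, hspec.2 s (hnbrs_bound s hs).1]
    cases hfind : (pvPlsR ranks 56).find? (fun p => p.1 == s) with
    | some p => simp
    | none => simp only [Option.map_none]; exact pvPyGetD_replicate s
  have hbridge := pvCount_bridge pawn (pvPlsR ranks 56) hPLnodup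
      (fun s => PySem.List.pyGetD board s none) nbrs hnbrs_nodup hread
  rw [hbridge]
  rw [pvPls_eq_plsR bp.toList 56, ← pvSplitOn_eq, ← hranks]

-- ===== VERDICT (by name: the statement is the Claim_ definition above) =====
theorem count_pawn_shield_py_spec : Claim_equal_count_pawn_shield_py := by
  intro board_part king_square color _ hpre
  unfold Pre_count_pawn_shield_py at hpre
  unfold Spec_count_pawn_shield_py
  exact pvMain board_part king_square color hpre.1 hpre.2
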